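-- pv_equiv track=rewrite | github.com/harry353/ProjectBzarre | data_sources/dst/dst_download.py | _fix_glued_negatives
-- ===== SOURCE A (Python) =====
-- def _fix_glued_negatives(line: str) -> str:
--     fixed = []
--     prev = " "
--     for ch in line:
--         if ch == "-" and prev not in [" ", "-"]:
--             fixed.append(" ")
--         fixed.append(ch)
--         prev = ch
--     return "".join(fixed)
-- ===== SOURCE B (Python) =====
-- import re
--
-- def _fix_glued_negatives(line: str) -> str:
--     # Insert a space before every '-' whose preceding character is neither a space nor a '-'.
--     return re.sub(r'(?<=[^ -])-', ' -', line)
-- ===== Notes on version B (the rewrite author's own statement) =====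
-- stated objective: idiomatic
-- what changed: Replaces the manual char loop with state (accumulator list + prev variable) by a single regex substitution with a lookbehind; no state is maintained.
import Mathlib
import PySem

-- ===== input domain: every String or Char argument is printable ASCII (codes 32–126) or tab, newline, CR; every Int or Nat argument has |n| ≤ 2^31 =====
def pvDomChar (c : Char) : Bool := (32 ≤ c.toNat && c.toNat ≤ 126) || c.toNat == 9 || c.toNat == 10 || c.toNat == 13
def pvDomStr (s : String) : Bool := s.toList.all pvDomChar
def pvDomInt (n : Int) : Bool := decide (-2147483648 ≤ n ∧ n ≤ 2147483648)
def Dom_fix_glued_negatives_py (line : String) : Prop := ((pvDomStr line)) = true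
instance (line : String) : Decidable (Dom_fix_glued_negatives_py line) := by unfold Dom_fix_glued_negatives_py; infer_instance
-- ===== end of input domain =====

-- B replaces A's stateful char-by-char loop with a single stateless pairwise pass
-- (a regex substitution in Python); objective: idiomatic, same output everywhere.


-- ===== PORT A =====
-- Loop with state (fixed, prev): append " " before a '-' glued to a non-space, non-'-' char.
def fix_glued_negatives_py (line : String) : String :=
  let r := line.toList.foldl
    (fun (st : List Char × Char) ch =>
      let fixed := if ch = '-' ∧ st.2 ≠ ' ' ∧ st.2 ≠ '-' then st.1 ++ [' '] else st.1
      (fixed ++ [ch], ch))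
    ([], ' ')
  String.ofList r.1

-- ===== PORT B =====
-- Hand port of re.sub(r'(?<=[^ -])-', ' -', line): the engine scans the ORIGINAL string
-- left to right; each '-' whose predecessor is neither ' ' nor '-' is replaced by " -",
-- every other character is kept. Exact on all inputs: each position is paired with its
-- predecessor (a virtual ' ' before position 0, where the lookbehind cannot match).
def fix_glued_negatives_py_alt (line : String) : String :=
  let cs := line.toList
  String.ofList (((' ' :: cs).zip cs).flatMap
    (fun p => if p.2 = '-' ∧ p.1 ≠ ' ' ∧ p.1 ≠ '-' then [' ', '-'] else [p.2]))

-- ===== PRECONDITION & SPEC =====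
def Spec_fix_glued_negatives_py (line : String) (out : String) : Prop := out = fix_glued_negatives_py_alt line
instance (line : String) (out : String) : Decidable (Spec_fix_glued_negatives_py line out) := by unfold Spec_fix_glued_negatives_py; infer_instance

-- ===== CLAIM (what is proved, stated in full; the proofs are below) =====
def Claim_equal_fix_glued_negatives_py : Prop := ∀ (line : String), Dom_fix_glued_negatives_py line → Spec_fix_glued_negatives_py line (fix_glued_negatives_py line)

-- ===== LEMMAS AND PROOFS =====

theorem fix_glued_loop_eq (cs : List Char) : ∀ (prev : Char) (acc : List Char),
    (cs.foldl
      (fun (st : List Char × Char) ch =>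
        let fixed := if ch = '-' ∧ st.2 ≠ ' ' ∧ st.2 ≠ '-' then st.1 ++ [' '] else st.1
        (fixed ++ [ch], ch))
      (acc, prev)).1
    = acc ++ ((prev :: cs).zip cs).flatMap
        (fun p => if p.2 = '-' ∧ p.1 ≠ ' ' ∧ p.1 ≠ '-' then [' ', '-'] else [p.2]) := by
  induction cs with
  | nil => intro prev acc; simp
  | cons c cs ih =>
    intro prev acc
    simp only [List.foldl_cons, List.zip_cons_cons, List.flatMap_cons, ih]
    by_cases h : c = '-' ∧ prev ≠ ' ' ∧ prev ≠ '-'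
    · obtain ⟨hc, h1, h2⟩ := h
      subst hc
      simp [h1, h2]
    · simp only [if_neg h]
      simp

-- ===== VERDICT (by name: the statement is the Claim_ definition above) =====
theorem fix_glued_negatives_py_spec : Claim_equal_fix_glued_negatives_py := by
  intro line _
  unfold Spec_fix_glued_negatives_py fix_glued_negatives_py fix_glued_negatives_py_alt
  simp [fix_glued_loop_eq line.toList ' ' []]
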